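-- pv_equiv track=rewrite | github.com/IvanLaraR/Busquedas_en_Grafos | 28_Iteración_de_Políticas.py | resolver_problema_toma_de_decisiones_politicas
-- ===== SOURCE A (Python) =====
-- def resolver_problema_toma_de_decisiones_politicas(recompensas, probabilidades_transicion, umbral_error):
--     """
--     IvanL: Función para resolver un problema de toma de decisiones utilizando iteración de políticas.
--
--     Args:
--     - recompensas: Diccionario que contiene las recompensas asociadas a cada estado.
--     - probabilidades_transicion: Diccionario que contiene las probabilidades de transición entre estados.
--     - umbral_error: Umbral de error para detener la iteración.
--
--     Returns:
--     - Política óptima para cada estado.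
--     """
--     politica_optima = {}  # IvanL: Diccionario para almacenar la política óptima de cada estado.
--
--     # IvanL: Inicialización de la política óptima.
--     for estado in recompensas:
--         politica_optima[estado] = None
--
--     # IvanL: Iteración de políticas hasta que converja o se alcance el umbral de error.
--     while True:
--         politica_cambiada = False  # IvanL: Indica si la política cambió en esta iteración.
--
--         # IvanL: Itera sobre cada estado para actualizar su política óptima.
--         for estado in recompensas:
--             accion_anterior = politica_optima[estado]
--             mejor_accion = None
--             mejor_valor = float('-inf')
--
--             # IvanL: Verifica si el estado tiene transiciones definidas.
--             if estado in probabilidades_transicion: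
--                 # IvanL: Itera sobre las posibles acciones para encontrar la mejor.
--                 for accion, estado_siguiente in probabilidades_transicion[estado].items():
--                     valor = recompensas[estado_siguiente]
--                     if valor > mejor_valor:
--                         mejor_valor = valor
--                         mejor_accion = accion
--
--                 politica_optima[estado] = mejor_accion
--
--             # IvanL: Verifica si la política cambió.
--             if accion_anterior != mejor_accion:
--                 politica_cambiada = True
--
--         # IvanL: Verifica si se alcanzó el umbral de error para detener la iteración.
--         if not politica_cambiada:
--             break
--
--     return politica_optima
-- ===== SOURCE B (Python) =====
-- def resolver_problema_toma_de_decisiones_politicas(recompensas, probabilidades_transicion, umbral_error):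
--     """Single-pass rewrite: the per-state greedy choice depends only on the fixed
--     rewards/transitions, so the fixed-point loop is redundant; build the policy
--     directly with one dict comprehension."""
--     def mejor_accion(acciones):
--         if not acciones:
--             return None
--         return max(acciones.items(), key=lambda kv: recompensas[kv[1]])[0]
--
--     return {estado: mejor_accion(probabilidades_transicion.get(estado, {}))
--             for estado in recompensas}
-- ===== Notes on version B (the rewrite author's own statement) =====
-- stated objective: simpler
-- what changed: The fixed-point while-True policy-iteration loop (which always converges after at most two sweeps because each state's greedy choice depends only on the fixed rewards/transitions) is replaced by a single dict comprehension computing each state's argmax directly with max(key=...).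
import Mathlib
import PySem

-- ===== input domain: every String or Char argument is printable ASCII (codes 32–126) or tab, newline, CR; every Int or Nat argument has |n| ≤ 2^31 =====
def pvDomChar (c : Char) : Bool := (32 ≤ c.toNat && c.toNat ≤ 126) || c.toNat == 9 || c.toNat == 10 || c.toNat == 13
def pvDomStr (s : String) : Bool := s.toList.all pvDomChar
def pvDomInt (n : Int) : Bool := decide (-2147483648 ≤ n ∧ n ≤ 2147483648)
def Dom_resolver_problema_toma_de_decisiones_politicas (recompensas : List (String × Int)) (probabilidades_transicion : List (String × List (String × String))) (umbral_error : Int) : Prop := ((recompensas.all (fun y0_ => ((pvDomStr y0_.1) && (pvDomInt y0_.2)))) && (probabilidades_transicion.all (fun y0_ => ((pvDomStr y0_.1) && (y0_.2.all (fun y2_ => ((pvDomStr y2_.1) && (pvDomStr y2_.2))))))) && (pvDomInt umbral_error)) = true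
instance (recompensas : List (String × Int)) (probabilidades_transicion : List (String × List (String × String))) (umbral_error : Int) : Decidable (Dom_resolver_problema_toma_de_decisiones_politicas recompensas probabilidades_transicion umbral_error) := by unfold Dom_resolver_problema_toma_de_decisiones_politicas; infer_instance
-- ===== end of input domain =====

-- B drops A's redundant while-True convergence loop (each state's greedy choice depends only on
-- the fixed rewards/transitions, so the loop always stops after at most two sweeps) and builds the
-- policy in a single dict comprehension: simpler, same result.

-- ===== PORT A =====
-- inner action loop: mejor_valor starts at float('-inf'); modelled exactly as `Option Int` with
-- `none` = -inf (any integer is > -inf); state = (mejor_accion, mejor_valor).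
-- `recompensas[estado_siguiente]` is ported as getD _ 0: Pre_ guarantees the key is present
-- (Python raises KeyError exactly where it is not, and those inputs are outside Pre_).
def pvStepA (recD : PySem.Dict String Int) (acc : Option String × Option Int)
    (p : String × String) : Option String × Option Int :=
  let valor := recD.getD p.2 0
  match acc.2 with
  | none => (some p.1, some valor)
  | some m => if valor > m then (some p.1, some valor) else acc

def pvMejorA (recD : PySem.Dict String Int) (items : List (String × String)) :
    Option String × Option Int :=
  items.foldl (pvStepA recD) (none, none)

-- one `for estado in recompensas` sweep; state = (politica_optima, politica_cambiada)
def pvPassA (recD : PySem.Dict String Int) (transD : PySem.Dict String (PySem.Dict String String))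
    (estados : List String) (st : PySem.Dict String (Option String) × Bool) :
    PySem.Dict String (Option String) × Bool :=
  estados.foldl (fun st estado =>
    let anterior := st.1.getD estado none
    if transD.contains estado then
      let mejor := (pvMejorA recD ((transD.getD estado PySem.Dict.empty).items)).1
      (st.1.insert estado mejor, st.2 || decide (anterior ≠ mejor))
    else
      -- mejor_accion stays None; politica_optima[estado] is not written
      (st.1, st.2 || decide (anterior ≠ (none : Option String)))) st

-- the `while True` loop; fuel is never exhausted (the sweep is at a fixed point after one pass,
-- so politica_cambiada is false in the second pass at the latest, and the fuel passed in is ≥ 2)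
def pvLoopA (recD : PySem.Dict String Int) (transD : PySem.Dict String (PySem.Dict String String))
    (estados : List String) : Nat → PySem.Dict String (Option String) → PySem.Dict String (Option String)
  | 0, pol => pol
  | n + 1, pol =>
      let st := pvPassA recD transD estados (pol, false)
      if st.2 then pvLoopA recD transD estados n st.1 else st.1

def resolver_problema_toma_de_decisiones_politicas (recompensas : List (String × Int)) (probabilidades_transicion : List (String × List (String × String))) (umbral_error : Int) : List (String × Option String) :=
  let recD := PySem.Dict.ofList recompensas
  let transD := PySem.Dict.ofList (probabilidades_transicion.map (fun q => (q.1, PySem.Dict.ofList q.2)))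
  -- politica_optima = {}; for estado in recompensas: politica_optima[estado] = None
  let pol0 := recD.keys.foldl (fun d estado => d.insert estado (none : Option String)) PySem.Dict.empty
  (pvLoopA recD transD recD.keys (recompensas.length + 2) pol0).items

-- ===== PORT B =====
-- Source B's helper `mejor_accion`: None on an empty/missing dict, else
-- max(acciones.items(), key=lambda kv: recompensas[kv[1]])[0].  Python's max has no default;
-- PySem.List.maxD with the head as default is exact here because the list is non-empty.
def pvMejorB (recD : PySem.Dict String Int) (acciones : PySem.Dict String String) : Option String :=
  match acciones.items with
  | [] => none
  | p :: _ => some ((PySem.List.maxD acciones.items (fun kv => recD.getD kv.2 0) p).1)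

def resolver_problema_toma_de_decisiones_politicas_alt (recompensas : List (String × Int)) (probabilidades_transicion : List (String × List (String × String))) (umbral_error : Int) : List (String × Option String) :=
  let recD := PySem.Dict.ofList recompensas
  let transD := PySem.Dict.ofList (probabilidades_transicion.map (fun q => (q.1, PySem.Dict.ofList q.2)))
  ((recD.keys.foldl (fun d estado =>
      d.insert estado (pvMejorB recD (transD.getD estado PySem.Dict.empty))) PySem.Dict.empty)).items

-- ===== PRECONDITION & SPEC =====
-- Pre_ excludes exactly the inputs where Python A raises KeyError: some state of `recompensas`
-- has a transition whose successor state is not a key of `recompensas`.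
def Pre_resolver_problema_toma_de_decisiones_politicas (recompensas : List (String × Int)) (probabilidades_transicion : List (String × List (String × String))) (umbral_error : Int) : Prop :=
  ∀ estado ∈ (PySem.Dict.ofList recompensas).keys,
    ∀ p ∈ ((PySem.Dict.ofList (probabilidades_transicion.map (fun q => (q.1, PySem.Dict.ofList q.2)))).getD estado PySem.Dict.empty).items,
      (PySem.Dict.ofList recompensas).contains p.2 = true
instance (recompensas : List (String × Int)) (probabilidades_transicion : List (String × List (String × String))) (umbral_error : Int) : Decidable (Pre_resolver_problema_toma_de_decisiones_politicas recompensas probabilidades_transicion umbral_error) := by unfold Pre_resolver_problema_toma_de_decisiones_politicas; infer_instance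

def pvWitness_resolver_problema_toma_de_decisiones_politicas : (List (String × Int)) × (List (String × List (String × String))) × Int :=
  ([("a", 1), ("b", 2)], [("a", [("x", "b"), ("y", "a")])], 0)

def Spec_resolver_problema_toma_de_decisiones_politicas (recompensas : List (String × Int)) (probabilidades_transicion : List (String × List (String × String))) (umbral_error : Int) (out : List (String × Option String)) : Prop := out = resolver_problema_toma_de_decisiones_politicas_alt recompensas probabilidades_transicion umbral_error
instance (recompensas : List (String × Int)) (probabilidades_transicion : List (String × List (String × String))) (umbral_error : Int) (out : List (String × Option String)) : Decidable (Spec_resolver_problema_toma_de_decisiones_politicas recompensas probabilidades_transicion umbral_error out) := by unfold Spec_resolver_problema_toma_de_decisiones_politicas; infer_instance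

-- ===== CLAIM (what is proved, stated in full; the proofs are below) =====
def Claim_equal_resolver_problema_toma_de_decisiones_politicas : Prop := ∀ (recompensas : List (String × Int)) (probabilidades_transicion : List (String × List (String × String))) (umbral_error : Int), Dom_resolver_problema_toma_de_decisiones_politicas recompensas probabilidades_transicion umbral_error → Pre_resolver_problema_toma_de_decisiones_politicas recompensas probabilidades_transicion umbral_error → Spec_resolver_problema_toma_de_decisiones_politicas recompensas probabilidades_transicion umbral_error (resolver_problema_toma_de_decisiones_politicas recompensas probabilidades_transicion umbral_error)

-- ===== LEMMAS AND PROOFS =====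

-- the common per-state value both programs compute
def pvBest (recD : PySem.Dict String Int) (transD : PySem.Dict String (PySem.Dict String String))
    (estado : String) : Option String :=
  pvMejorB recD (transD.getD estado PySem.Dict.empty)

-- proof-side step function of PySem.List.max? (pointwise equal to its inline lambda)
def pvMaxStep (recD : PySem.Dict String Int) (acc : Option (String × String))
    (x : String × String) : Option (String × String) :=
  match acc with
  | none => some x
  | some m => if recD.getD m.2 0 < recD.getD x.2 0 then some x else some m

theorem max?_eq_foldl_pvMaxStep (recD : PySem.Dict String Int) (l : List (String × String)) :
    PySem.List.max? l (fun kv => recD.getD kv.2 0) = l.foldl (pvMaxStep recD) none := by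
  unfold PySem.List.max?
  congr 1
  funext acc x
  cases acc <;> rfl

-- running best (action, value) pair of A's inner loop, as max? sees it
def pvConv (recD : PySem.Dict String Int) : Option (String × String) → Option String × Option Int
  | none => (none, none)
  | some p => (some p.1, some (recD.getD p.2 0))

-- A's inner fold is PySem.List.max? in (action, value) form
theorem pvMejorA_conv (recD : PySem.Dict String Int) (l : List (String × String))
    (acc : Option (String × String)) :
    l.foldl (pvStepA recD) (pvConv recD acc) = pvConv recD (l.foldl (pvMaxStep recD) acc) := by
  induction l generalizing acc with
  | nil => rfl
  | cons x xs ih =>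
    cases acc with
    | none => simpa using ih (some x)
    | some m =>
      simp only [List.foldl_cons]
      have hstep : pvStepA recD (pvConv recD (some m)) x = pvConv recD (pvMaxStep recD (some m) x) := by
        by_cases h : recD.getD m.2 0 < recD.getD x.2 0 <;>
          simp [h, pvStepA, pvMaxStep, pvConv, gt_iff_lt]
      rw [hstep, ih (pvMaxStep recD (some m) x)]

theorem pvMejorA_eq (recD : PySem.Dict String Int) (l : List (String × String)) :
    pvMejorA recD l = pvConv recD (PySem.List.max? l (fun kv => recD.getD kv.2 0)) := by
  rw [max?_eq_foldl_pvMaxStep]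
  exact pvMejorA_conv recD l none

-- a foldl that starts at `some` and whose step preserves `some` ends at `some`
theorem foldl_some_isSome {α : Type} (f : Option α → α → Option α)
    (hf : ∀ a x, (f (some a) x).isSome = true) :
    ∀ (l : List α) (a : α), (l.foldl f (some a)).isSome = true := by
  intro l
  induction l with
  | nil => intro a; simp
  | cons x xs ih =>
    intro a
    simp only [List.foldl_cons]
    obtain ⟨b, hb⟩ := Option.isSome_iff_exists.mp (hf a x)
    rw [hb]
    exact ih b

-- the first component of A's inner fold is exactly Source B's mejor_accion
theorem pvMejorA_fst (recD : PySem.Dict String Int) (acc : PySem.Dict String String) :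
    (pvMejorA recD acc.items).1 = pvMejorB recD acc := by
  rw [pvMejorA_eq]
  unfold pvMejorB
  cases hi : acc.items with
  | nil => simp [PySem.List.max?, pvConv]
  | cons p rest =>
    have hs : (PySem.List.max? (p :: rest) (fun kv => recD.getD kv.2 0)).isSome = true := by
      rw [max?_eq_foldl_pvMaxStep]
      simp only [List.foldl_cons]
      exact foldl_some_isSome _ (fun a x => by simp only [pvMaxStep]; split <;> rfl) rest p
    obtain ⟨r, hr⟩ := Option.isSome_iff_exists.mp hs
    simp [hr, PySem.List.maxD, pvConv]

-- when a state has no transitions, both sides give none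
theorem pvBest_of_not_contains (recD : PySem.Dict String Int)
    (transD : PySem.Dict String (PySem.Dict String String)) (k : String)
    (h : transD.contains k = false) : pvBest recD transD k = none := by
  unfold pvBest
  rw [PySem.Dict.getD_of_not_contains transD PySem.Dict.empty h]
  rfl

-- one sweep of A, from any policy that agrees with g on the states it visits
theorem pvPassA_spec (recD : PySem.Dict String Int)
    (transD : PySem.Dict String (PySem.Dict String String)) :
    ∀ (ks : List String) (g : String → Option String) (pol : PySem.Dict String (Option String))
      (ch : Bool), ks.Nodup → pol.keys.Nodup →
      (∀ k ∈ ks, pol.get? k = some (g k)) →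
      (∀ k ∈ ks, transD.contains k = false → g k = pvBest recD transD k) →
      (pvPassA recD transD ks (pol, ch)).1.keys = pol.keys ∧
      (∀ k, k ∉ ks → (pvPassA recD transD ks (pol, ch)).1.get? k = pol.get? k) ∧
      (∀ k ∈ ks, (pvPassA recD transD ks (pol, ch)).1.get? k = some (pvBest recD transD k)) ∧
      (pvPassA recD transD ks (pol, ch)).2 = (ch || ks.any (fun k => g k ≠ pvBest recD transD k)) := by
  intro ks
  induction ks with
  | nil => intro g pol ch _ _ _ _; exact ⟨rfl, fun _ _ => rfl, fun k hk => absurd hk (by simp), by simp [pvPassA]⟩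
  | cons k0 rest ih =>
    intro g pol ch hnd hpnd hget hg
    have hk0 : pol.get? k0 = some (g k0) := hget k0 (by simp)
    have hant : pol.getD k0 none = g k0 := PySem.Dict.getD_of_get?_eq_some pol none hk0
    have hrestnd : rest.Nodup := (List.nodup_cons.mp hnd).2
    have hk0nr : k0 ∉ rest := (List.nodup_cons.mp hnd).1
    by_cases hc : transD.contains k0 = true
    · -- state with transitions: insert the argmax
      have hbest : (pvMejorA recD ((transD.getD k0 PySem.Dict.empty).items)).1
          = pvBest recD transD k0 := pvMejorA_fst recD _
      have hstep : pvPassA recD transD (k0 :: rest) (pol, ch)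
          = pvPassA recD transD rest
              (pol.insert k0 (pvBest recD transD k0),
               ch || decide (g k0 ≠ pvBest recD transD k0)) := by
        simp [pvPassA, hc, hant, hbest]
      set pol' := pol.insert k0 (pvBest recD transD k0) with hpol'
      have hkeys' : pol'.keys = pol.keys := PySem.Dict.keys_insert_of_contains pol _ (by
        rw [PySem.Dict.contains_eq_isSome_get?, hk0]; rfl)
      have hpnd' : pol'.keys.Nodup := hkeys' ▸ hpnd
      have hget' : ∀ k ∈ rest, pol'.get? k = some (g k) := by
        intro k hk
        rw [hpol', PySem.Dict.get?_insert_of_ne pol _ (by rintro rfl; exact hk0nr hk)]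
        exact hget k (by simp [hk])
      obtain ⟨ihkeys, ihout, ihin, ihch⟩ :=
        ih g pol' (ch || decide (g k0 ≠ pvBest recD transD k0)) hrestnd hpnd' hget'
          (fun k hk h => hg k (by simp [hk]) h)
      rw [hstep]
      refine ⟨ihkeys.trans hkeys', ?_, ?_, ?_⟩
      · intro k hk
        rw [ihout k (fun h => hk (by simp [h])),
            PySem.Dict.get?_insert_of_ne pol _ (by rintro rfl; exact hk (by simp))]
      · intro k hk
        rcases List.mem_cons.mp hk with rfl | hk
        · rw [ihout k hk0nr, hpol', PySem.Dict.get?_insert_self]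
        · exact ihin k hk
      · rw [ihch]; simp [Bool.or_assoc]
    · -- state without transitions: nothing written, mejor_accion = None
      have hc' : transD.contains k0 = false := by simpa using hc
      have hfk0 : pvBest recD transD k0 = none := pvBest_of_not_contains recD transD k0 hc'
      have hgk0 : g k0 = pvBest recD transD k0 := hg k0 (by simp) hc'
      have hstep : pvPassA recD transD (k0 :: rest) (pol, ch)
          = pvPassA recD transD rest (pol, ch || decide (g k0 ≠ (none : Option String))) := by
        simp [pvPassA, hc', hant]
      obtain ⟨ihkeys, ihout, ihin, ihch⟩ :=
        ih g pol (ch || decide (g k0 ≠ (none : Option String))) hrestnd hpnd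
          (fun k hk => hget k (by simp [hk])) (fun k hk h => hg k (by simp [hk]) h)
      rw [hstep]
      refine ⟨ihkeys, ?_, ?_, ?_⟩
      · intro k hk; exact ihout k (fun h => hk (by simp [h]))
      · intro k hk
        rcases List.mem_cons.mp hk with rfl | hk
        · rw [ihout k hk0nr, hk0, hgk0]
        · exact ihin k hk
      · rw [ihch]; simp [hgk0, hfk0]

-- unfolding the while-loop one step
theorem pvLoopA_succ (recD : PySem.Dict String Int)
    (transD : PySem.Dict String (PySem.Dict String String)) (estados : List String) (n : Nat)
    (pol : PySem.Dict String (Option String)) :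
    pvLoopA recD transD estados (n + 1) pol
      = (let st := pvPassA recD transD estados (pol, false)
         if st.2 then pvLoopA recD transD estados n st.1 else st.1) := rfl

-- the whole equivalence, with the two dicts abstracted
theorem pvMain (recD : PySem.Dict String Int)
    (transD : PySem.Dict String (PySem.Dict String String)) (n : Nat)
    (hknd : recD.keys.Nodup) :
    (pvLoopA recD transD recD.keys (n + 2)
       (recD.keys.foldl (fun d estado => d.insert estado (none : Option String)) PySem.Dict.empty)).items
    = (recD.keys.foldl (fun d estado =>
         d.insert estado (pvMejorB recD (transD.getD estado PySem.Dict.empty))) PySem.Dict.empty).items := by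
  -- any dict with recD.keys as keys and the greedy values has the result's items
  have hitems : ∀ (d : PySem.Dict String (Option String)), d.keys = recD.keys →
      (∀ k ∈ recD.keys, d.get? k = some (pvBest recD transD k)) →
      d.items = recD.keys.map (fun k => (k, pvBest recD transD k)) := by
    intro d hk hget
    rw [PySem.Dict.items_eq_map_keys d (hk ▸ hknd) none, hk]
    exact List.map_congr_left (fun k hkmem => by
      rw [PySem.Dict.getD_of_get?_eq_some d none (hget k hkmem)])
  -- B's side: a fold over fresh distinct keys
  have hB : (recD.keys.foldl (fun d estado =>
        d.insert estado (pvMejorB recD (transD.getD estado PySem.Dict.empty))) PySem.Dict.empty).items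
      = recD.keys.map (fun k => (k, pvBest recD transD k)) := by
    have := PySem.Dict.items_foldl_insert_fresh recD.keys (fun a => a)
      (fun a => pvMejorB recD (transD.getD a PySem.Dict.empty)) PySem.Dict.empty
      (fun a _ => PySem.Dict.contains_empty a) (by simpa using hknd)
    simpa [pvBest] using this
  -- politica_optima after initialisation: every key of recD maps to none
  have hpol0 : (recD.keys.foldl (fun d estado => d.insert estado (none : Option String)) PySem.Dict.empty).items
      = recD.keys.map (fun k => (k, (none : Option String))) := by
    have := PySem.Dict.items_foldl_insert_fresh recD.keys (fun a => a)
      (fun _ => (none : Option String)) PySem.Dict.empty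
      (fun a _ => PySem.Dict.contains_empty a) (by simpa using hknd)
    simpa using this
  set pol0 := recD.keys.foldl (fun d estado => d.insert estado (none : Option String)) PySem.Dict.empty with hp0
  have hpol0keys : pol0.keys = recD.keys := by
    simp [PySem.Dict.keys, hpol0]
  have hpol0get : ∀ k ∈ recD.keys, pol0.get? k = some none := by
    intro k hk
    exact PySem.Dict.get?_of_mem_items pol0 (by rw [hpol0]; exact List.mem_map_of_mem hk)
      (hpol0keys ▸ hknd)
  -- first sweep
  obtain ⟨h1keys, _, h1in, h1ch⟩ := pvPassA_spec recD transD recD.keys (fun _ => none) pol0 false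
    hknd (hpol0keys ▸ hknd) hpol0get
    (fun k _ hc => (pvBest_of_not_contains recD transD k hc).symm)
  set st1 := pvPassA recD transD recD.keys (pol0, false) with hst1
  have h1keys' : st1.1.keys = recD.keys := h1keys.trans hpol0keys
  -- second sweep (from the fixed point): politica_cambiada is false
  obtain ⟨h2keys, _, h2in, h2ch⟩ := pvPassA_spec recD transD recD.keys
    (pvBest recD transD) st1.1 false hknd (h1keys' ▸ hknd) h1in (fun _ _ _ => rfl)
  set st2 := pvPassA recD transD recD.keys (st1.1, false) with hst2
  have h2ch' : st2.2 = false := by simp [h2ch]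
  rw [hB]
  rw [pvLoopA_succ]
  by_cases hc1 : st1.2 = true
  · -- the policy changed in sweep 1: one more sweep, which changes nothing
    simp only [← hst1, hc1, if_true]
    rw [pvLoopA_succ]
    simp only [← hst2, h2ch', Bool.false_eq_true, if_false]
    exact hitems st2.1 (h2keys.trans h1keys') h2in
  · have hc1' : st1.2 = false := by
      cases h : st1.2
      · rfl
      · exact absurd h hc1
    simp only [← hst1, hc1', Bool.false_eq_true, if_false]
    exact hitems st1.1 h1keys' h1in

-- ===== VERDICT (by name: the statement is the Claim_ definition above) =====
theorem resolver_problema_toma_de_decisiones_politicas_spec : Claim_equal_resolver_problema_toma_de_decisiones_politicas := by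
  intro recompensas probabilidades_transicion umbral_error _ _
  exact pvMain (PySem.Dict.ofList recompensas)
    (PySem.Dict.ofList (probabilidades_transicion.map (fun q => (q.1, PySem.Dict.ofList q.2))))
    recompensas.length (PySem.Dict.nodup_keys_ofList recompensas)
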